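-- pv_equiv track=rewrite | github.com/xiema/competitive | uva/12118_inspdilemma.py | dfs
-- ===== SOURCE A (Python) =====
-- def dfs(g, u, p, f):
--     e,o = 0,0
--     f[u] = False
--     for v in g[u]:
--         if v == p:
--             continue
--         if v in f:
--             if f[v]:
--                 continue
--             else:
--                 e+=1
--                 continue
--         _e,_o = dfs(g, v, u, f)
--         e,o = e+_e+1,o+_o
--     f[u] = True
--     if len(g[u])%2:
--         o += 1
--
--     return e,o
-- ===== SOURCE B (Python) =====
-- def dfs(g, u, p, f):
--     # Iterative DFS with an explicit stack of frames (node, parent, next-neighbor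
--     # index, e, o); mutates f exactly like the recursive original.
--     stack = [[u, p, 0, 0, 0]]
--     f[u] = False
--     while True:
--         fr = stack[-1]
--         node, par, i = fr[0], fr[1], fr[2]
--         adj = g[node]
--         if i < len(adj):
--             fr[2] = i + 1
--             v = adj[i]
--             if v == par:
--                 continue
--             if v in f:
--                 if not f[v]:
--                     fr[3] += 1
--                 continue
--             f[v] = False
--             stack.append([v, node, 0, 0, 0])
--         else:
--             f[node] = True
--             e, o = fr[3], fr[4]
--             if len(adj) % 2:
--                 o += 1
--             stack.pop()
--             if not stack:
--                 return e, o
--             top = stack[-1]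
--             top[3] += e + 1
--             top[4] += o
-- ===== Notes on version B (the rewrite author's own statement) =====
-- stated objective: alternative
-- what changed: The recursive DFS is replaced by an iterative DFS over an explicit stack of frames (node, parent, next-neighbor index, e, o), folding each finished frame's counts into its parent; f is mutated identically.
import Mathlib
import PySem

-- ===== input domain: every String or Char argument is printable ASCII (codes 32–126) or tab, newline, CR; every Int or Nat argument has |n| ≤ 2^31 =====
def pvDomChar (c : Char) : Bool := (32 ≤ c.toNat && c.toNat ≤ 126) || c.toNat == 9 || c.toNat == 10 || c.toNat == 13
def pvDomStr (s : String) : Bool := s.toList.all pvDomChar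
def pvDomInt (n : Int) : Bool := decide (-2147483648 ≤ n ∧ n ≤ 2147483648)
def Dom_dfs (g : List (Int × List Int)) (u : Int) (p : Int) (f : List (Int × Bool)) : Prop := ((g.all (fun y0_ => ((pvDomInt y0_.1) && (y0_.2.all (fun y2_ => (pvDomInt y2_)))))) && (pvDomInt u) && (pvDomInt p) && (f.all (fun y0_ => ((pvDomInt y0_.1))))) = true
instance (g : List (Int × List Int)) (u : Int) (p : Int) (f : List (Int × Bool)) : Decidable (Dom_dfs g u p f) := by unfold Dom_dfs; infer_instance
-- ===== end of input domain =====

-- B replaces A's recursive DFS by an iterative DFS over an explicit stack of frames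
-- (objective: alternative decomposition, same asymptotic cost); A and B mutate the
-- caller's dict f identically (every visited node ends up True) — the equivalence
-- proved here is about the return value.

-- ===== PORT A =====
-- A's recursion, fueled (fuel = g.length + 1 at top level is provably never
-- exhausted: each nested call visits a fresh key of g); the for-loop over g[u]
-- is the structural recursion foldA over the same state (e, o, f).
mutual
def dfsAuxA (gd : PySem.Dict Int (List Int)) : Nat → Int → Int → PySem.Dict Int Bool → (Int × Int) × PySem.Dict Int Bool
  | 0, _, _, f => ((0, 0), f)
  | Nat.succ m, u, p, f =>
      let adj := gd.getD u []
      let r := foldA gd m u p adj (0, 0, f.insert u false)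
      ((r.1, if adj.length % 2 == 1 then r.2.1 + 1 else r.2.1), r.2.2.insert u true)
  termination_by n => (n, 0, 0)

def foldA (gd : PySem.Dict Int (List Int)) (m : Nat) (u p : Int) : List Int → Int × Int × PySem.Dict Int Bool → Int × Int × PySem.Dict Int Bool
  | [], s => s
  | v :: rest, (e, o, f) =>
      if v = p then foldA gd m u p rest (e, o, f)
      else match f.get? v with
        | some b => if b then foldA gd m u p rest (e, o, f) else foldA gd m u p rest (e + 1, o, f)
        | none =>
            let r := dfsAuxA gd m v u f
            foldA gd m u p rest (e + r.1.1 + 1, o + r.1.2, r.2)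
  termination_by l => (m, 1, l.length)
end

def dfs (g : List (Int × List Int)) (u : Int) (p : Int) (f : List (Int × Bool)) : Int × Int :=
  (dfsAuxA (PySem.Dict.ofList g) (g.length + 1) u p (PySem.Dict.ofList f)).1

-- ===== PORT B =====
-- A stack frame of Source B: node, parent, the not-yet-scanned suffix of g[node]
-- (Source B's index i into g[node]), and the accumulators e, o.
structure PVFrame where
  fuel : Nat          -- fuel guard only (never exhausted; invisible in Source B)
  node : Int
  par  : Int
  rest : List Int
  e    : Int
  o    : Int
deriving Repr, DecidableEq

-- termination bound for pvRun: (longest adjacency list) + 2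
def pvBnd (gd : PySem.Dict Int (List Int)) : Nat := (gd.values.map List.length).foldr Nat.max 0 + 2

def pvWt (B : Nat) (st : List PVFrame) : Nat := st.foldr (fun fr acc => (fr.rest.length + 1) * B ^ fr.fuel + acc) 0

lemma pv_le_foldr_max {x : Nat} {xs : List Nat} (h : x ∈ xs) : x ≤ xs.foldr Nat.max 0 := by
  induction xs with
  | nil => cases h
  | cons a t ih =>
      rcases List.mem_cons.1 h with rfl | h'
      · exact Nat.le_max_left _ _
      · exact le_trans (ih h') (Nat.le_max_right _ _)

lemma pvAdjLen_lt (gd : PySem.Dict Int (List Int)) (v : Int) :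
    (gd.getD v []).length + 1 < pvBnd gd := by
  unfold pvBnd
  cases h : gd.get? v with
  | none => simp [PySem.Dict.getD_of_get?_eq_none _ _ h]
  | some l =>
      rw [PySem.Dict.getD_of_get?_eq_some _ _ h]
      have hm : l ∈ gd.values := by
        have hi := PySem.Dict.mem_items_of_get?_eq_some _ h
        have : l = (v, l).2 := rfl
        rw [this]
        exact List.mem_map_of_mem hi
      have := pv_le_foldr_max (List.mem_map_of_mem (f := List.length) hm)
      omega

lemma pvBnd_pow_pos (gd : PySem.Dict Int (List Int)) (n : Nat) : 1 ≤ pvBnd gd ^ n :=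
  Nat.one_le_pow _ _ (by unfold pvBnd; omega)

-- the while-loop of Source B
def pvRun (gd : PySem.Dict Int (List Int)) : List PVFrame → PySem.Dict Int Bool → Int × Int
  | [], _ => (0, 0)
  | fr :: S, f =>
    match h : fr.rest with
    | [] =>
      let adj := gd.getD fr.node []
      let o := if adj.length % 2 == 1 then fr.o + 1 else fr.o
      let f := f.insert fr.node true
      match S with
      | [] => (fr.e, o)
      | pr :: S' => pvRun gd ({ pr with e := pr.e + fr.e + 1, o := pr.o + o } :: S') f
    | v :: rest' =>
      if v = fr.par then pvRun gd ({ fr with rest := rest' } :: S) f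
      else match f.get? v with
        | some b =>
            if b then pvRun gd ({ fr with rest := rest' } :: S) f
            else pvRun gd ({ fr with rest := rest', e := fr.e + 1 } :: S) f
        | none =>
          match hf : fr.fuel with
          | 0 => pvRun gd ({ fr with rest := rest', e := fr.e + 1 } :: S) f
          | Nat.succ m =>
            pvRun gd ({ fuel := m, node := v, par := fr.node, rest := gd.getD v [], e := 0, o := 0 } :: { fr with rest := rest' } :: S) (f.insert v false)
  termination_by st _ => pvWt (pvBnd gd) st
  decreasing_by
    · simp [pvWt]; exact pvBnd_pow_pos gd fr.fuel
    · simp [pvWt, h]; exact (Nat.mul_lt_mul_right (pvBnd_pow_pos gd fr.fuel)).2 (by omega)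
    · simp [pvWt, h]; exact (Nat.mul_lt_mul_right (pvBnd_pow_pos gd fr.fuel)).2 (by omega)
    · simp [pvWt, h]; exact (Nat.mul_lt_mul_right (pvBnd_pow_pos gd fr.fuel)).2 (by omega)
    · simp [pvWt, h, hf]
      have h1 : ((gd.getD v []).length + 1) * pvBnd gd ^ m < pvBnd gd ^ (m + 1) := by
        rw [pow_succ, Nat.mul_comm (pvBnd gd ^ m) (pvBnd gd)]
        exact (Nat.mul_lt_mul_right (pvBnd_pow_pos gd m)).2 (pvAdjLen_lt gd v)
      nlinarith [h1]

def dfs_alt (g : List (Int × List Int)) (u : Int) (p : Int) (f : List (Int × Bool)) : Int × Int :=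
  let gd := PySem.Dict.ofList g
  pvRun gd [⟨g.length, u, p, gd.getD u [], 0, 0⟩] ((PySem.Dict.ofList f).insert u false)

-- ===== PRECONDITION & SPEC =====
-- Pre_ is exactly the condition under which the Python A returns (no KeyError):
-- every node reachable from u — stepping through neighbours not already in f and
-- skipping the root's parent edge u→p — must be a key of g.  pvReach is the
-- reflexive-transitive closure of that neighbour relation (a property of the
-- input graph, not a replay of either port).
def pvReach (g : List (Int × List Int)) (u : Int) (p : Int) (f : List (Int × Bool)) : List Int :=
  let fk := f.map Prod.fst
  let step : List Int → List Int := fun s =>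
    PySem.Set.update s (s.flatMap (fun x =>
      ((PySem.Dict.ofList g).getD x []).filter (fun v => !fk.contains v && !(x == u && v == p))))
  step^[g.length + 1] (PySem.Set.ofList [u])

def Pre_dfs (g : List (Int × List Int)) (u : Int) (p : Int) (f : List (Int × Bool)) : Prop :=
  ∀ x ∈ pvReach g u p f, x ∈ g.map Prod.fst
instance (g : List (Int × List Int)) (u : Int) (p : Int) (f : List (Int × Bool)) : Decidable (Pre_dfs g u p f) := by unfold Pre_dfs; infer_instance

def pvWitness_dfs : (List (Int × List Int)) × Int × Int × (List (Int × Bool)) :=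
  ([(0, [1, 2]), (1, [0, 2]), (2, [0, 1])], 0, -1, [])

def Spec_dfs (g : List (Int × List Int)) (u : Int) (p : Int) (f : List (Int × Bool)) (out : Int × Int) : Prop := out = dfs_alt g u p f
instance (g : List (Int × List Int)) (u : Int) (p : Int) (f : List (Int × Bool)) (out : Int × Int) : Decidable (Spec_dfs g u p f out) := by unfold Spec_dfs; infer_instance

-- ===== CLAIM (what is proved, stated in full; the proofs are below) =====
def Claim_equal_dfs : Prop := ∀ (g : List (Int × List Int)) (u : Int) (p : Int) (f : List (Int × Bool)), Dom_dfs g u p f → Pre_dfs g u p f → Spec_dfs g u p f (dfs g u p f)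

-- ===== LEMMAS AND PROOFS =====

-- finalisation of one frame (f[u] = True; odd-degree bump) and resumption of the
-- suspended parent frames: the defunctionalised continuation of A's recursion
def pvFin (gd : PySem.Dict Int (List Int)) (node : Int) (s : Int × Int × PySem.Dict Int Bool) : (Int × Int) × PySem.Dict Int Bool :=
  ((s.1, if (gd.getD node []).length % 2 == 1 then s.2.1 + 1 else s.2.1), s.2.2.insert node true)

def pvResume (gd : PySem.Dict Int (List Int)) : List PVFrame → (Int × Int) × PySem.Dict Int Bool → Int × Int
  | [], r => r.1
  | pr :: S, r => pvRun gd ({ pr with e := pr.e + r.1.1 + 1, o := pr.o + r.1.2 } :: S) r.2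

lemma pvWt_lt_skip (gd : PySem.Dict Int (List Int)) (n : Nat) (u p e o e' o' v : Int) (rest' : List Int) (S : List PVFrame) :
    pvWt (pvBnd gd) (⟨n, u, p, rest', e', o'⟩ :: S) < pvWt (pvBnd gd) (⟨n, u, p, v :: rest', e, o⟩ :: S) := by
  simp [pvWt]
  exact (Nat.mul_lt_mul_right (pvBnd_pow_pos gd n)).2 (by omega)

lemma pvWt_lt_push (gd : PySem.Dict Int (List Int)) (m : Nat) (u p e o v : Int) (rest' : List Int) (S : List PVFrame) :
    pvWt (pvBnd gd) (⟨m, v, u, gd.getD v [], 0, 0⟩ :: ⟨m + 1, u, p, rest', e, o⟩ :: S) <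
      pvWt (pvBnd gd) (⟨m + 1, u, p, v :: rest', e, o⟩ :: S) := by
  simp [pvWt]
  have h1 : ((gd.getD v []).length + 1) * pvBnd gd ^ m < pvBnd gd ^ (m + 1) := by
    rw [pow_succ, Nat.mul_comm (pvBnd gd ^ m) (pvBnd gd)]
    exact (Nat.mul_lt_mul_right (pvBnd_pow_pos gd m)).2 (pvAdjLen_lt gd v)
  nlinarith [h1]

lemma pvWt_cons (B : Nat) (fr : PVFrame) (S : List PVFrame) :
    pvWt B (fr :: S) = (fr.rest.length + 1) * B ^ fr.fuel + pvWt B S := rfl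

lemma pvRun_eq (gd : PySem.Dict Int (List Int)) :
    ∀ (N : Nat) (fr : PVFrame) (S : List PVFrame) (f : PySem.Dict Int Bool),
      pvWt (pvBnd gd) (fr :: S) ≤ N →
      pvRun gd (fr :: S) f =
        pvResume gd S (pvFin gd fr.node (foldA gd fr.fuel fr.node fr.par fr.rest (fr.e, fr.o, f))) := by
  intro N
  induction N with
  | zero =>
      intro fr S f hN
      exfalso
      have h1 := pvBnd_pow_pos gd fr.fuel
      rw [pvWt_cons] at hN
      have h2 := Nat.mul_pos (show 0 < fr.rest.length + 1 by omega) h1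
      linarith
  | succ N ih =>
      intro fr S f hN
      obtain ⟨n, u, p, rest, e, o⟩ := fr
      cases rest with
      | nil =>
          cases S with
          | nil => rw [pvRun]; simp [pvResume, pvFin, foldA]
          | cons pr S' => rw [pvRun]; simp [pvResume, pvFin, foldA]
      | cons v rest' =>
          by_cases hv : v = p
          · subst hv
            rw [pvRun]
            dsimp only
            rw [if_pos rfl]
            have hm := pvWt_lt_skip gd n u v e o e o v rest' S
            rw [ih ⟨n, u, v, rest', e, o⟩ S f (by omega)]
            conv_rhs => rw [foldA]
            simp
          · cases hfv : f.get? v with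
            | some b =>
                cases b
                · rw [pvRun]
                  simp only [if_neg hv, hfv]
                  have hm := pvWt_lt_skip gd n u p e o (e + 1) o v rest' S
                  rw [ih ⟨n, u, p, rest', e + 1, o⟩ S f (by omega)]
                  conv_rhs => rw [foldA]
                  simp [hv, hfv]
                · rw [pvRun]
                  simp only [if_neg hv, hfv]
                  have hm := pvWt_lt_skip gd n u p e o e o v rest' S
                  rw [ih ⟨n, u, p, rest', e, o⟩ S f (by omega)]
                  conv_rhs => rw [foldA]
                  simp [hv, hfv]
            | none =>
                cases n with
                | zero =>
                    rw [pvRun]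
                    simp only [if_neg hv, hfv]
                    have hm := pvWt_lt_skip gd 0 u p e o (e + 1) o v rest' S
                    rw [ih ⟨0, u, p, rest', e + 1, o⟩ S f (by omega)]
                    conv_rhs => rw [foldA]
                    simp [hv, hfv, dfsAuxA]
                | succ m =>
                    rw [pvRun]
                    simp only [if_neg hv, hfv]
                    have hm := pvWt_lt_push gd m u p e o v rest' S
                    rw [ih ⟨m, v, u, gd.getD v [], 0, 0⟩ (⟨m + 1, u, p, rest', e, o⟩ :: S) (f.insert v false) (by omega)]
                    have hda : pvFin gd v (foldA gd m v u (gd.getD v []) (0, 0, f.insert v false)) = dfsAuxA gd (m + 1) v u f := by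
                      rw [dfsAuxA]; rfl
                    rw [hda, pvResume]
                    have hm2 := pvWt_lt_skip gd (m + 1) u p e o
                        (e + (dfsAuxA gd (m + 1) v u f).1.1 + 1) (o + (dfsAuxA gd (m + 1) v u f).1.2) v rest' S
                    rw [ih ⟨m + 1, u, p, rest', e + (dfsAuxA gd (m + 1) v u f).1.1 + 1, o + (dfsAuxA gd (m + 1) v u f).1.2⟩ S
                        (dfsAuxA gd (m + 1) v u f).2 (by omega)]
                    conv_rhs => rw [foldA]
                    simp [hv, hfv]

-- ===== VERDICT (by name: the statement is the Claim_ definition above) =====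
theorem dfs_spec : Claim_equal_dfs := by
  intro g u p f _ _
  unfold Spec_dfs dfs dfs_alt
  rw [pvRun_eq (PySem.Dict.ofList g) (pvWt (pvBnd (PySem.Dict.ofList g)) [⟨g.length, u, p, (PySem.Dict.ofList g).getD u [], 0, 0⟩]) _ _ _ (le_refl _)]
  rw [dfsAuxA]
  simp [pvResume, pvFin]
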